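-- pv_equiv track=rewrite | github.com/gurumanie-singh/threat-brief | scripts/send_email.py | _bucket_by_severity
-- ===== SOURCE A (Python) =====
-- from typing import Any
--
-- def _bucket_by_severity(articles: list[dict[str, Any]]) -> dict[str, list[dict[str, Any]]]:
--     buckets: dict[str, list[dict[str, Any]]] = {
--         "critical": [], "high": [], "medium": [], "other": [],
--     }
--     for a in articles:
--         sev = a.get("severity", "")
--         if sev in buckets:
--             buckets[sev].append(a)
--         else:
--             buckets["other"].append(a)
--     return buckets
-- ===== SOURCE B (Python) =====
-- from typing import Any
--
-- def _bucket_by_severity(articles: list[dict[str, Any]]) -> dict[str, list[dict[str, Any]]]: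
--     named = ("critical", "high", "medium")
--     buckets = {k: [a for a in articles if a.get("severity", "") == k] for k in named}
--     buckets["other"] = [a for a in articles if a.get("severity", "") not in named]
--     return buckets
-- ===== Notes on version B (the rewrite author's own statement) =====
-- stated objective: alternative
-- what changed: Replaces the single pass with an if/else dispatch into a mutable bucket dict by four independent filtered scans of the article list, one per output key, assembled directly into the result dict.
import Mathlib
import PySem

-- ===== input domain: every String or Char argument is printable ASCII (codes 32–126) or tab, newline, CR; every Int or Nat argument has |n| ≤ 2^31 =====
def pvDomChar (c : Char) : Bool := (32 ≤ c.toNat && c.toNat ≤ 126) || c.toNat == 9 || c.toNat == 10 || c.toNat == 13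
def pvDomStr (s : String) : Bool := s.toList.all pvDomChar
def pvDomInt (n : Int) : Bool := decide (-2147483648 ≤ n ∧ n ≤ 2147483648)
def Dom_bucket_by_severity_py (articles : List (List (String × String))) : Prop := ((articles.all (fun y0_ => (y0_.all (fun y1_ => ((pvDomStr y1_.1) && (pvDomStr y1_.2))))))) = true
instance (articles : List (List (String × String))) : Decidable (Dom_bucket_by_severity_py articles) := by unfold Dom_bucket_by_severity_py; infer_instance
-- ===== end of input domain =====

-- B replaces A's single pass with if/else dispatch into a mutable bucket dict by four
-- independent filtered scans of the article list, one per output key (alternative decomposition).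


-- ===== PORT A =====
-- a.get("severity", "") (used by both ports: both Pythons read the key the same way)
def pvSevA (a : List (String × String)) : String :=
  PySem.Dict.getD (PySem.Dict.mk a) "severity" ""

-- the loop body: sev = a.get(...); if sev in buckets: buckets[sev].append(a) else buckets["other"].append(a)
def pvStepA (b : PySem.Dict String (List (List (String × String))))
    (a : List (String × String)) : PySem.Dict String (List (List (String × String))) :=
  let sev := pvSevA a
  if b.contains sev then b.modify sev [] (· ++ [a])
  else b.modify "other" [] (· ++ [a])

def bucket_by_severity_py (articles : List (List (String × String))) : List (String × List (List (String × String))) :=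
  let buckets : PySem.Dict String (List (List (String × String))) :=
    PySem.Dict.ofList [("critical", []), ("high", []), ("medium", []), ("other", [])]
  (articles.foldl pvStepA buckets).items

-- ===== PORT B =====
-- Source B uses the same accessor a.get("severity", ""), i.e. pvSevA

def bucket_by_severity_py_alt (articles : List (List (String × String))) : List (String × List (List (String × String))) :=
  let named : List String := ["critical", "high", "medium"]
  (named.map (fun k => (k, articles.filter (fun a => pvSevA a == k))))
    ++ [("other", articles.filter (fun a => !(named.contains (pvSevA a))))]

-- ===== PRECONDITION & SPEC =====
def Spec_bucket_by_severity_py (articles : List (List (String × String))) (out : List (String × List (List (String × String)))) : Prop := out = bucket_by_severity_py_alt articles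
instance (articles : List (List (String × String))) (out : List (String × List (List (String × String)))) : Decidable (Spec_bucket_by_severity_py articles out) := by unfold Spec_bucket_by_severity_py; infer_instance

-- ===== CLAIM (what is proved, stated in full; the proofs are below) =====
def Claim_equal_bucket_by_severity_py : Prop := ∀ (articles : List (List (String × String))), Dom_bucket_by_severity_py articles → Spec_bucket_by_severity_py articles (bucket_by_severity_py articles)

-- ===== LEMMAS AND PROOFS =====

-- loop invariant: folding A's step from a literal 4-bucket dict appends exactly B's filters
theorem pvFoldA_items (articles : List (List (String × String)))
    (xc xh xm xo : List (List (String × String))) :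
    (articles.foldl pvStepA (PySem.Dict.mk
        [("critical", xc), ("high", xh), ("medium", xm), ("other", xo)])).items
      = [("critical", xc ++ articles.filter (fun a => pvSevA a == "critical")),
         ("high", xh ++ articles.filter (fun a => pvSevA a == "high")),
         ("medium", xm ++ articles.filter (fun a => pvSevA a == "medium")),
         ("other", xo ++ articles.filter (fun a =>
            !((["critical", "high", "medium"] : List String).contains (pvSevA a))))] := by
  induction articles generalizing xc xh xm xo with
  | nil => simp
  | cons a rest ih =>
    simp only [List.foldl_cons]
    by_cases hc : pvSevA a = "critical"
    · have : pvStepA (PySem.Dict.mk [("critical", xc), ("high", xh), ("medium", xm), ("other", xo)]) a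
          = PySem.Dict.mk [("critical", xc ++ [a]), ("high", xh), ("medium", xm), ("other", xo)] := by
        apply PySem.Dict.ext
        simp [pvStepA, hc, PySem.Dict.contains, PySem.Dict.modify,
              PySem.Dict.insert, PySem.Dict.getD, PySem.Dict.get?]
      rw [this, ih]
      simp [hc]
    · by_cases hh : pvSevA a = "high"
      · have : pvStepA (PySem.Dict.mk [("critical", xc), ("high", xh), ("medium", xm), ("other", xo)]) a
            = PySem.Dict.mk [("critical", xc), ("high", xh ++ [a]), ("medium", xm), ("other", xo)] := by
          apply PySem.Dict.ext
          simp [pvStepA, hh, PySem.Dict.contains, PySem.Dict.modify,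
                PySem.Dict.insert, PySem.Dict.getD, PySem.Dict.get?]
        rw [this, ih]
        simp [hh]
      · by_cases hm : pvSevA a = "medium"
        · have : pvStepA (PySem.Dict.mk [("critical", xc), ("high", xh), ("medium", xm), ("other", xo)]) a
              = PySem.Dict.mk [("critical", xc), ("high", xh), ("medium", xm ++ [a]), ("other", xo)] := by
            apply PySem.Dict.ext
            simp [pvStepA, hm, PySem.Dict.contains, PySem.Dict.modify,
                  PySem.Dict.insert, PySem.Dict.getD, PySem.Dict.get?]
          rw [this, ih]
          simp [hm]
        · have : pvStepA (PySem.Dict.mk [("critical", xc), ("high", xh), ("medium", xm), ("other", xo)]) a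
              = PySem.Dict.mk [("critical", xc), ("high", xh), ("medium", xm), ("other", xo ++ [a])] := by
            by_cases ho : pvSevA a = "other"
            · apply PySem.Dict.ext
              simp only [pvStepA, ho]
              simp [PySem.Dict.contains, PySem.Dict.modify,
                    PySem.Dict.insert, PySem.Dict.getD, PySem.Dict.get?]
            · apply PySem.Dict.ext
              simp [pvStepA, Ne.symm hc, Ne.symm hh, Ne.symm hm, Ne.symm ho,
                    PySem.Dict.contains, PySem.Dict.modify,
                    PySem.Dict.insert, PySem.Dict.getD, PySem.Dict.get?]
          rw [this, ih]
          simp [hc, hh, hm]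

-- ===== VERDICT (by name: the statement is the Claim_ definition above) =====
theorem bucket_by_severity_py_spec : Claim_equal_bucket_by_severity_py := by
  intro articles _
  show _ = _
  rw [bucket_by_severity_py, bucket_by_severity_py_alt]
  rw [show (PySem.Dict.ofList [("critical", ([] : List (List (String × String)))), ("high", []), ("medium", []), ("other", [])])
        = PySem.Dict.mk [("critical", []), ("high", []), ("medium", []), ("other", [])] from rfl]
  rw [pvFoldA_items]
  simp
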